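-- pv_equiv track=rewrite | github.com/robroskie/BrainYard-II-Part-II | processHelper.py | removeSplit
-- ===== SOURCE A (Python) =====
-- def removeSplit(file):
--     #Remove empty lines
--     file2 = ''
--     lineCounts = 0
--     maxWordsSentence = 0
--     minWordsSentence = 10000
--     sumWords = 0
--
--     #Split the file into a list of words and remove any empty lines
--     lines = file.split("\n")
--
--     non_empty_lines = [
--                         line for line in lines
--                         if line.strip() != ''
--                         ]
--
--     for line in non_empty_lines:
--         file2 += line + "\n"
--         lineCounts += 1
--
--         #Calculate sentence and word metrics
--         temp = line.split(" ")
--         maxWordsSentence = max(maxWordsSentence, len(temp))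
--         minWordsSentence = min(minWordsSentence, len(temp))
--         sumWords += len(temp)
--
--     words = file2.split()
--     return words, lineCounts, maxWordsSentence, minWordsSentence, file2
-- ===== SOURCE B (Python) =====
-- def removeSplit(file):
--     # One streaming pass over the characters: a '\n' sentinel terminates the last line;
--     # blank-line detection and word counting are done per character (count of ' '),
--     # never via split("\n")/split(" ").
--     parts = []
--     lineCounts = 0
--     maxWordsSentence = 0
--     minWordsSentence = 10000
--     cur = []
--     blank = True
--     spaces = 0
--     for ch in file + "\n":
--         if ch == '\n':
--             if not blank:
--                 parts.append(''.join(cur))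
--                 parts.append('\n')
--                 lineCounts += 1
--                 n = spaces + 1
--                 if n > maxWordsSentence:
--                     maxWordsSentence = n
--                 if n < minWordsSentence:
--                     minWordsSentence = n
--             cur = []
--             blank = True
--             spaces = 0
--         else:
--             cur.append(ch)
--             if ch == ' ':
--                 spaces += 1
--             if blank and not ch.isspace():
--                 blank = False
--     file2 = ''.join(parts)
--     return file2.split(), lineCounts, maxWordsSentence, minWordsSentence, file2
-- ===== Notes on version B (the rewrite author's own statement) =====
-- stated objective: alternative
-- what changed: A splits the text into a list of lines and re-splits each kept line on the space character inside one fused five-accumulator loop; B is a single character-level streaming state machine (with a newline sentinel ending the last line) that detects blank lines and counts each line's words as space-count plus one on the fly, doing no line or word splitting at all.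
import Mathlib
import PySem

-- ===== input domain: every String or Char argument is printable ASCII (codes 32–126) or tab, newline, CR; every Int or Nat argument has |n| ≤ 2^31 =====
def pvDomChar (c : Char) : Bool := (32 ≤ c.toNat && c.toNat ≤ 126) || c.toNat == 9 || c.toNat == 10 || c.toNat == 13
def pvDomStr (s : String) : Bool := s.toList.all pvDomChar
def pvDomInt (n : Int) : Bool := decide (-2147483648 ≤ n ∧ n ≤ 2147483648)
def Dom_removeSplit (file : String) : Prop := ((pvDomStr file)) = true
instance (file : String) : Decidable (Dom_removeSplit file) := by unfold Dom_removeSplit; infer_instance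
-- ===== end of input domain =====

-- B replaces A's split-into-lines-then-resplit-each-line-on-' ' computation by a single
-- character-level streaming state machine (a '\n' sentinel ends the last line; words are
-- counted as spaces+1 on the fly); objective: alternative algorithm, same cost.

-- ===== PORT A =====
def removeSplit (file : String) : List String × Int × Int × Int × String :=
  let lines := (PySem.Str.split? file "\n").getD []
  let nonEmptyLines := lines.filter (fun line => PySem.Str.strip line != "")
  let st := nonEmptyLines.foldl
    (fun (s : String × Int × Int × Int × Int) line =>
      (PySem.Str.join "" [s.1, line, "\n"], s.2.1 + 1,
        max s.2.2.1 ((((PySem.Str.split? line " ").getD []).length : Int)),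
        min s.2.2.2.1 ((((PySem.Str.split? line " ").getD []).length : Int)),
        s.2.2.2.2 + (((PySem.Str.split? line " ").getD []).length : Int)))
    ("", 0, 0, 10000, 0)
  (PySem.Str.split₀ st.1, st.2.1, st.2.2.1, st.2.2.2.1, st.1)

-- ===== PORT B =====
-- state of Source B's loop: (parts, lineCounts, maxWordsSentence, minWordsSentence, blank, spaces, cur)
structure BState where
  parts : List String
  lineCounts : Int
  maxW : Int
  minW : Int
  blank : Bool
  spaces : Int
  cur : List Char
deriving Repr, DecidableEq

-- one iteration of Source B's 'for ch in file + "\n"' loop body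
def bStep (s : BState) (ch : Char) : BState :=
  if ch = '\n' then
    if !s.blank then
      { parts := s.parts ++ [String.ofList s.cur, "\n"],
        lineCounts := s.lineCounts + 1,
        maxW := if s.spaces + 1 > s.maxW then s.spaces + 1 else s.maxW,
        minW := if s.spaces + 1 < s.minW then s.spaces + 1 else s.minW,
        blank := true, spaces := 0, cur := [] }
    else
      { s with blank := true, spaces := 0, cur := [] }
  else
    { s with cur := s.cur ++ [ch],
             spaces := s.spaces + (if ch = ' ' then 1 else 0),
             blank := s.blank && PySem.Chars.isspace ch }

def removeSplit_alt (file : String) : List String × Int × Int × Int × String :=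
  -- 'for ch in file + "\n"': the characters of file followed by the '\n' sentinel
  let st := (file.toList ++ ['\n']).foldl bStep ⟨[], 0, 0, 10000, true, 0, []⟩
  let file2 := PySem.Str.join "" st.parts
  (PySem.Str.split₀ file2, st.lineCounts, st.maxW, st.minW, file2)

-- ===== PRECONDITION & SPEC =====
def Spec_removeSplit (file : String) (out : List String × Int × Int × Int × String) : Prop := out = removeSplit_alt file
instance (file : String) (out : List String × Int × Int × Int × String) : Decidable (Spec_removeSplit file out) := by unfold Spec_removeSplit; infer_instance

-- ===== CLAIM (what is proved, stated in full; the proofs are below) =====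
def Claim_equal_removeSplit : Prop := ∀ (file : String), Dom_removeSplit file → Spec_removeSplit file (removeSplit file)

-- ===== LEMMAS AND PROOFS =====

-- structural (fuel-free) version of splitting a char list on one separator char
def mySplit (sep : Char) : List Char → List (List Char)
  | [] => [[]]
  | c :: rest =>
    let r := mySplit sep rest
    if c = sep then [] :: r
    else
      match r with
      | [] => [[c]]
      | h :: t => (c :: h) :: t

theorem mySplit_ne_nil (sep : Char) (l : List Char) : mySplit sep l ≠ [] := by
  cases l with
  | nil => simp [mySplit]
  | cons c rest =>
    simp only [mySplit]
    split_ifs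
    · simp
    · cases mySplit sep rest <;> simp

theorem splitOn_go_singleton (sep : Char) (l : List Char) :
    ∀ (fuel : Nat), l.length < fuel → ∀ (cur : List Char) (acc : List (List Char)),
    PySem.Chars.splitOn.go [sep] fuel l cur acc
      = acc.reverse ++ (match mySplit sep l with
          | [] => []
          | h :: t => (cur.reverse ++ h) :: t) := by
  induction l with
  | nil =>
    intro fuel hf cur acc
    cases fuel with
    | zero => omega
    | succ f => simp [PySem.Chars.splitOn.go, mySplit]
  | cons c rest ih =>
    intro fuel hf cur acc
    cases fuel with
    | zero => omega
    | succ f =>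
      by_cases hc : c = sep
      · subst hc
        have : PySem.Chars.splitOn.go [c] (f + 1) (c :: rest) cur acc
            = PySem.Chars.splitOn.go [c] f rest [] (cur.reverse :: acc) := by
          simp [PySem.Chars.splitOn.go, List.isPrefixOf]
        rw [this, ih f (by simpa using hf) [] (cur.reverse :: acc)]
        rcases hr : mySplit c rest with _ | ⟨h, t⟩
        · exact absurd hr (mySplit_ne_nil c rest)
        · simp [mySplit, hr]
      · have : PySem.Chars.splitOn.go [sep] (f + 1) (c :: rest) cur acc
            = PySem.Chars.splitOn.go [sep] f rest (c :: cur) acc := by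
          simp [PySem.Chars.splitOn.go, List.isPrefixOf, Ne.symm hc]
        rw [this, ih f (by simpa using hf) (c :: cur) acc]
        rcases hr : mySplit sep rest with _ | ⟨h, t⟩
        · exact absurd hr (mySplit_ne_nil sep rest)
        · simp [mySplit, hr, hc]

theorem splitOn_singleton (sep : Char) (l : List Char) :
    PySem.Chars.splitOn l [sep] = mySplit sep l := by
  unfold PySem.Chars.splitOn
  rw [splitOn_go_singleton sep l (l.length + 1) (by omega) [] []]
  rcases hr : mySplit sep l with _ | ⟨h, t⟩
  · exact absurd hr (mySplit_ne_nil sep l)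
  · simp

theorem mySplit_length (sep : Char) (l : List Char) :
    (mySplit sep l).length = l.count sep + 1 := by
  induction l with
  | nil => simp [mySplit]
  | cons c rest ih =>
    simp only [mySplit]
    by_cases hc : c = sep
    · subst hc; simp [ih]
    · rcases hr : mySplit sep rest with _ | ⟨h, t⟩
      · exact absurd hr (mySplit_ne_nil sep rest)
      · simp [hc, hr] at ih ⊢
        simpa [List.count_cons, hc] using ih

-- s.split(sep) for nonempty sep, viewed as char lists
theorem str_split_toLists (s sep : String) (hsep : sep.toList ≠ []) :
    ((PySem.Str.split? s sep).getD []).map String.toList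
      = PySem.Chars.splitOn s.toList sep.toList := by
  have h := PySem.Str.split?_map s sep
  unfold PySem.Chars.split? at h
  rcases hv : PySem.Str.split? s sep with _ | xs
  · rw [hv] at h
    simp [List.isEmpty_iff, hsep] at h
  · rw [hv] at h
    simp [List.isEmpty_iff, hsep] at h
    simpa using h

-- line.strip() != '' is "some character of the line is not whitespace"
theorem strip_eq_nil_iff (l : List Char) :
    PySem.Chars.strip l = [] ↔ l.all PySem.Chars.isspace = true := by
  unfold PySem.Chars.strip PySem.Chars.rstrip PySem.Chars.lstrip
  constructor
  · intro h
    have h1 : ∀ x ∈ List.dropWhile PySem.Chars.isspace l, PySem.Chars.isspace x = true := by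
      intro x hx
      have h2 : List.dropWhile PySem.Chars.isspace
          (List.dropWhile PySem.Chars.isspace l).reverse = [] :=
        List.reverse_eq_nil_iff.mp h
      exact List.dropWhile_eq_nil_iff.mp h2 x (List.mem_reverse.mpr hx)
    rw [List.all_eq_true]
    intro x hx
    rcases List.mem_append.mp
      ((List.takeWhile_append_dropWhile (p := PySem.Chars.isspace) (l := l)) ▸ hx) with h2 | h2
    · exact List.mem_takeWhile_imp h2
    · exact h1 x h2
  · intro h
    have : List.dropWhile PySem.Chars.isspace l = [] :=
      List.dropWhile_eq_nil_iff.mpr (fun x hx => List.all_eq_true.mp h x hx)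
    simp [this]

-- ''.join over List Char is the flatten of the pieces
theorem charsJoin_nil_eq_flatten (xss : List (List Char)) :
    PySem.Chars.join [] xss = xss.flatten := by
  induction xss with
  | nil => simp [PySem.Chars.join, List.intercalate]
  | cons x t ih =>
    cases t with
    | nil => simp [PySem.Chars.join, List.intercalate]
    | cons y t' =>
      simp only [PySem.Chars.join, List.intercalate] at ih ⊢
      simp [List.intersperse] at ih ⊢
      exact ih

-- the fused accumulator loop of A, decomposed into independent reductions
theorem removeSplit_loop (cnt : String → Int) (l : List String)
    (a : String) (c mx mn sw : Int) :
    l.foldl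
      (fun (s : String × Int × Int × Int × Int) line =>
        (PySem.Str.join "" [s.1, line, "\n"], s.2.1 + 1,
          max s.2.2.1 (cnt line), min s.2.2.2.1 (cnt line), s.2.2.2.2 + cnt line))
      (a, c, mx, mn, sw)
    = (PySem.Str.join "" (a :: l.map (fun line => PySem.Str.join "" [line, "\n"])),
        c + (l.length : Int), (l.map cnt).foldl max mx, (l.map cnt).foldl min mn,
        sw + (l.map cnt).sum) := by
  induction l generalizing a c mx mn sw with
  | nil =>
    simp only [List.foldl_nil, List.map_nil, List.length_nil]
    refine Prod.ext ?_ (by simp)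
    apply String.toList_inj.mp
    simp
  | cons x t ih =>
    simp only [List.foldl_cons, List.map_cons, List.length_cons]
    rw [ih]
    refine Prod.ext ?_ (by simp [add_comm, add_assoc, add_left_comm])
    apply String.toList_inj.mp
    simp [charsJoin_nil_eq_flatten]

-- what B's machine does to the four output accumulators at the end of a non-blank line
def flushLine (p : List String × Int × Int × Int) (l : List Char) : List String × Int × Int × Int :=
  (p.1 ++ [String.ofList l, "\n"], p.2.1 + 1,
    if (l.count ' ' : Int) + 1 > p.2.2.1 then (l.count ' ' : Int) + 1 else p.2.2.1,
    if (l.count ' ' : Int) + 1 < p.2.2.2 then (l.count ' ' : Int) + 1 else p.2.2.2)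

-- glue a partial current line onto the first piece of a split
def consHead (cur : List Char) : List (List Char) → List (List Char)
  | [] => [cur]
  | h :: t => (cur ++ h) :: t

-- B's char-level machine = per-line flushes over the '\n'-split of the input
theorem bfold (cs : List Char) :
    ∀ (parts : List String) (lc mx mn : Int) (cur : List Char) (blank : Bool) (spaces : Int),
    blank = cur.all PySem.Chars.isspace → spaces = (cur.count ' ' : Int) →
    (cs ++ ['\n']).foldl bStep ⟨parts, lc, mx, mn, blank, spaces, cur⟩
      = (let q := ((consHead cur (mySplit '\n' cs)).filter
            (fun l => !l.all PySem.Chars.isspace)).foldl flushLine (parts, lc, mx, mn);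
         ⟨q.1, q.2.1, q.2.2.1, q.2.2.2, true, 0, []⟩) := by
  induction cs with
  | nil =>
    intro parts lc mx mn cur blank spaces hb hs
    subst hb; subst hs
    by_cases hall : cur.all PySem.Chars.isspace = true
    · simp [bStep, mySplit, consHead, hall]
    · simp [bStep, mySplit, consHead, hall, flushLine]
  | cons c rest ih =>
    intro parts lc mx mn cur blank spaces hb hs
    subst hb; subst hs
    by_cases hc : c = '\n'
    · subst hc
      by_cases hall : cur.all PySem.Chars.isspace = true
      · have hstep : bStep ⟨parts, lc, mx, mn, cur.all PySem.Chars.isspace, (cur.count ' ' : Int), cur⟩ '\n'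
            = ⟨parts, lc, mx, mn, true, 0, []⟩ := by
          simp [bStep, hall]
        simp only [List.cons_append, List.foldl_cons, hstep]
        rw [ih parts lc mx mn [] true 0 (by simp) (by simp)]
        rcases hr : mySplit '\n' rest with _ | ⟨h, t⟩
        · exact absurd hr (mySplit_ne_nil '\n' rest)
        · simp [mySplit, consHead, hr, hall]
      · have hstep : bStep ⟨parts, lc, mx, mn, cur.all PySem.Chars.isspace, (cur.count ' ' : Int), cur⟩ '\n'
            = ⟨parts ++ [String.ofList cur, "\n"], lc + 1,
                if (cur.count ' ' : Int) + 1 > mx then (cur.count ' ' : Int) + 1 else mx,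
                if (cur.count ' ' : Int) + 1 < mn then (cur.count ' ' : Int) + 1 else mn,
                true, 0, []⟩ := by
          simp [bStep, hall]
        simp only [List.cons_append, List.foldl_cons, hstep]
        rw [ih _ _ _ _ [] true 0 (by simp) (by simp)]
        rcases hr : mySplit '\n' rest with _ | ⟨h, t⟩
        · exact absurd hr (mySplit_ne_nil '\n' rest)
        · simp [mySplit, consHead, hr, hall, flushLine]
    · have hstep : bStep ⟨parts, lc, mx, mn, cur.all PySem.Chars.isspace, (cur.count ' ' : Int), cur⟩ c
          = ⟨parts, lc, mx, mn, (cur ++ [c]).all PySem.Chars.isspace,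
              ((cur ++ [c]).count ' ' : Int), cur ++ [c]⟩ := by
        have hblank : (cur.all PySem.Chars.isspace && PySem.Chars.isspace c)
            = (cur ++ [c]).all PySem.Chars.isspace := by
          simp [List.all_append]
        have hsp : (cur.count ' ' : Int) + (if c = ' ' then 1 else 0)
            = ((cur ++ [c]).count ' ' : Int) := by
          by_cases h : c = ' ' <;> simp [h, List.count_append]
        simp only [bStep, if_neg hc, hblank, hsp]
      simp only [List.cons_append, List.foldl_cons, hstep]
      rw [ih _ _ _ _ (cur ++ [c]) _ _ rfl rfl]
      rcases hr : mySplit '\n' rest with _ | ⟨h, t⟩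
      · exact absurd hr (mySplit_ne_nil '\n' rest)
      · simp [mySplit, consHead, hr, hc]

-- the flushLine fold, decomposed into independent reductions
theorem flush_fold (F : List (List Char)) :
    ∀ (parts : List String) (lc mx mn : Int),
    F.foldl flushLine (parts, lc, mx, mn)
      = (parts ++ F.flatMap (fun l => [String.ofList l, "\n"]),
          lc + (F.length : Int),
          F.foldl (fun m l => max m ((l.count ' ' : Int) + 1)) mx,
          F.foldl (fun m l => min m ((l.count ' ' : Int) + 1)) mn) := by
  induction F with
  | nil => intro parts lc mx mn; simp
  | cons x t ih =>
    intro parts lc mx mn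
    simp only [List.foldl_cons, flushLine, List.flatMap_cons, List.length_cons]
    rw [ih]
    simp only [Prod.mk.injEq]
    refine ⟨by simp, by push_cast; ring, ?_, ?_⟩
    · congr 1
      rw [max_def]; split_ifs <;> omega
    · congr 1
      rw [min_def]; split_ifs <;> omega

-- line.strip() != '' as a char-level test
theorem strne (line : String) :
    (PySem.Str.strip line != "") = !(line.toList.all PySem.Chars.isspace) := by
  by_cases h : line.toList.all PySem.Chars.isspace = true
  · have hs : PySem.Str.strip line = "" := by
      apply String.toList_inj.mp
      rw [PySem.Str.toList_strip]
      simpa using (strip_eq_nil_iff line.toList).mpr h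
    simp [hs, h]
  · have hs : PySem.Str.strip line ≠ "" := by
      intro he
      exact h ((strip_eq_nil_iff line.toList).mp (by rw [← PySem.Str.toList_strip, he]; rfl))
    simp only [Bool.not_eq_true] at h
    simp [hs, h]

-- len(line.split(" ")) = count of ' ' + 1
theorem cnt_eq (line : String) :
    ((((PySem.Str.split? line " ").getD []).length : Int))
      = (line.toList.count ' ' : Int) + 1 := by
  have h := str_split_toLists line " " (by decide)
  rw [show (" " : String).toList = [' '] from by decide] at h
  have hlen : ((PySem.Str.split? line " ").getD []).length
      = (PySem.Chars.splitOn line.toList [' ']).length := by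
    rw [← h, List.length_map]
  rw [hlen, splitOn_singleton, mySplit_length]
  push_cast
  ring

theorem removeSplit_eq (file : String) : removeSplit file = removeSplit_alt file := by
  unfold removeSplit removeSplit_alt
  dsimp only
  rw [removeSplit_loop (cnt := fun line => (((PySem.Str.split? line " ").getD []).length : Int))]
  rw [bfold file.toList [] 0 0 10000 [] true 0 (by simp) (by simp)]
  have hch : consHead [] (mySplit '\n' file.toList) = mySplit '\n' file.toList := by
    rcases hr : mySplit '\n' file.toList with _ | ⟨h, t⟩
    · exact absurd hr (mySplit_ne_nil _ _)
    · simp [consHead]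
  rw [hch, flush_fold]
  set lines := (PySem.Str.split? file "\n").getD [] with hlinesdef
  set ne := lines.filter (fun line => PySem.Str.strip line != "") with hnedef
  set F := (mySplit '\n' file.toList).filter (fun l => !l.all PySem.Chars.isspace) with hFdef
  have hlines : lines.map String.toList = mySplit '\n' file.toList := by
    rw [hlinesdef, str_split_toLists file "\n" (by decide),
      show ("\n" : String).toList = ['\n'] from by decide, splitOn_singleton]
  have hF : F = ne.map String.toList := by
    rw [hFdef, ← hlines, List.filter_map, hnedef]
    congr 1
    apply List.filter_congr
    intro line _
    simpa using (strne line).symm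
  -- file2 agrees
  have hfile2 : PySem.Str.join "" ("" :: ne.map (fun line => PySem.Str.join "" [line, "\n"]))
      = PySem.Str.join "" ([] ++ F.flatMap (fun l => [String.ofList l, "\n"])) := by
    apply String.toList_inj.mp
    rw [PySem.Str.toList_join, PySem.Str.toList_join,
      show ("" : String).toList = [] from rfl,
      charsJoin_nil_eq_flatten, charsJoin_nil_eq_flatten, hF]
    simp only [List.nil_append, List.map_cons, List.flatten_cons,
      show ("" : String).toList = [] from rfl, List.nil_append, List.map_flatMap]
    have hgen : ∀ (l : List String),
        (List.map String.toList (List.map (fun line => PySem.Str.join "" [line, "\n"]) l)).flatten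
          = (List.flatMap (fun a => (String.ofList a).toList :: "\n".toList :: List.map String.toList [])
              (List.map String.toList l)).flatten := by
      intro l
      induction l with
      | nil => simp
      | cons x t ih =>
        simp only [List.map_cons, List.flatMap_cons, List.flatten_cons, List.map_nil] at ih ⊢
        simp [PySem.Str.toList_join, charsJoin_nil_eq_flatten]
        simpa using ih
    exact hgen ne
  -- line counts agree
  have hlc : (0 : Int) + (ne.length : Int) = 0 + (F.length : Int) := by
    rw [hF, List.length_map]
  -- max agrees
  have hmx : (ne.map (fun line => (((PySem.Str.split? line " ").getD []).length : Int))).foldl max 0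
      = F.foldl (fun m l => max m ((l.count ' ' : Int) + 1)) 0 := by
    rw [hF, List.foldl_map, List.foldl_map]
    apply PySem.List.foldl_congr_mem
    intro acc line _
    rw [cnt_eq]
  -- min agrees
  have hmn : (ne.map (fun line => (((PySem.Str.split? line " ").getD []).length : Int))).foldl min 10000
      = F.foldl (fun m l => min m ((l.count ' ' : Int) + 1)) 10000 := by
    rw [hF, List.foldl_map, List.foldl_map]
    apply PySem.List.foldl_congr_mem
    intro acc line _
    rw [cnt_eq]
  simp only [hfile2, hlc, hmx, hmn]

-- ===== VERDICT (by name: the statement is the Claim_ definition above) =====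
theorem removeSplit_spec : Claim_equal_removeSplit := by
  intro file _
  unfold Spec_removeSplit
  exact removeSplit_eq file
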